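-- pv_equiv track=rewrite | github.com/konszymanski/leetcode-dataset | obfuscated_solutions/python/1482-minimum-number-of-days-to-make-m-bouquets/solution_1_universal_wrap.py | get_num_of_bouquets
-- ===== SOURCE A (Python) =====
-- def get_num_of_bouquets(bloomDay, mid, k):
--     if True:
--         num_of_bouquets = 0
--     count = 0
--     if True:
--         for day in bloomDay:
--             if day <= mid:
--                 count += 1
--             else:
--                 count = 0
--             if count == k:
--                 num_of_bouquets += 1
--                 count = 0
--     if True:
--         return num_of_bouquets
-- ===== SOURCE B (Python) =====
-- def get_num_of_bouquets(bloomDay, mid, k):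
--     runs = []
--     run = 0
--     for day in bloomDay:
--         if day <= mid:
--             run += 1
--         else:
--             if run:
--                 runs.append(run)
--             run = 0
--     if run:
--         runs.append(run)
--     return sum(r // k for r in runs)
-- ===== Notes on version B (the rewrite author's own statement) =====
-- stated objective: alternative
-- what changed: Replaces A's bank-and-reset counter with a two-phase computation: collect the maximal runs of consecutive bloomed flowers, then sum len(run)//k over them.
-- outside the precondition, e.g. on get_num_of_bouquets([1, 5], 3, 0): A returns 1, B raises ZeroDivisionError; on get_num_of_bouquets([1], 1, -1): A returns 0, B returns -1
import Mathlib
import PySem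

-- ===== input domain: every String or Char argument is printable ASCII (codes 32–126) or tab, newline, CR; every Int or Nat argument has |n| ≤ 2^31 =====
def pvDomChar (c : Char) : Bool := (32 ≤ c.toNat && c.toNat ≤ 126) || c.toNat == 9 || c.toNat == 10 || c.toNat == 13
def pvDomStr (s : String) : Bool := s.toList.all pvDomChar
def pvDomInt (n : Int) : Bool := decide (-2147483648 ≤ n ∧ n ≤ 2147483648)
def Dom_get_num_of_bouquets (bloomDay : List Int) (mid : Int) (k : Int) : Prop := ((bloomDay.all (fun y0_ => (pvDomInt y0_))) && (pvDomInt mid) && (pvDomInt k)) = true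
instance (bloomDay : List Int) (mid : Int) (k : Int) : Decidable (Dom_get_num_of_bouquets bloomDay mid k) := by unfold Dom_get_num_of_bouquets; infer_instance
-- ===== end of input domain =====

-- B replaces A's bank-and-reset counter with a two-phase computation (collect maximal
-- bloomed runs, then sum run//k); same O(n) cost, different decomposition.


-- ===== PORT A =====
-- transliteration of A: one fold carrying (num_of_bouquets, count)
def get_num_of_bouquets (bloomDay : List Int) (mid : Int) (k : Int) : Int :=
  (bloomDay.foldl
    (fun (s : Int × Int) day =>
      let count := if day ≤ mid then s.2 + 1 else 0
      if count = k then (s.1 + 1, 0) else (s.1, count))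
    (0, 0)).1

-- ===== PORT B =====
-- transliteration of Source B's run collector: build the list of maximal bloomed-run lengths
def pvRunsAux (bloomDay : List Int) (mid : Int) (run : Int) : List Int :=
  match bloomDay with
  | [] => if run ≠ 0 then [run] else []
  | day :: rest =>
    if day ≤ mid then pvRunsAux rest mid (run + 1)
    else if run ≠ 0 then run :: pvRunsAux rest mid 0
    else pvRunsAux rest mid 0

def get_num_of_bouquets_alt (bloomDay : List Int) (mid : Int) (k : Int) : Int :=
  (pvRunsAux bloomDay mid 0).foldl (fun s r => s + PySem.Int.floordiv r k) 0

-- ===== PRECONDITION & SPEC =====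
-- Pre_ restricts to the problem's natural domain k >= 1: for k = 0 B's floor division
-- raises ZeroDivisionError (A's reset counter happens to count unbloomed flowers), and
-- k < 0 is outside the task's natural domain (A returns 0 there as an accident).
def Pre_get_num_of_bouquets (bloomDay : List Int) (mid : Int) (k : Int) : Prop := 1 ≤ k
instance (bloomDay : List Int) (mid : Int) (k : Int) : Decidable (Pre_get_num_of_bouquets bloomDay mid k) := by unfold Pre_get_num_of_bouquets; infer_instance
def pvWitness_get_num_of_bouquets : List Int × Int × Int := ([1, 10, 3, 10, 2], 3, 1)

def Spec_get_num_of_bouquets (bloomDay : List Int) (mid : Int) (k : Int) (out : Int) : Prop := out = get_num_of_bouquets_alt bloomDay mid k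
instance (bloomDay : List Int) (mid : Int) (k : Int) (out : Int) : Decidable (Spec_get_num_of_bouquets bloomDay mid k out) := by unfold Spec_get_num_of_bouquets; infer_instance

-- ===== CLAIM (what is proved, stated in full; the proofs are below) =====
def Claim_equal_get_num_of_bouquets : Prop := ∀ (bloomDay : List Int) (mid : Int) (k : Int), Dom_get_num_of_bouquets bloomDay mid k → Pre_get_num_of_bouquets bloomDay mid k → Spec_get_num_of_bouquets bloomDay mid k (get_num_of_bouquets bloomDay mid k)

-- ===== LEMMAS AND PROOFS =====

-- sum of r // k over a run list, with a starting accumulator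
def pvSumDiv (l : List Int) (k : Int) (acc : Int) : Int :=
  l.foldl (fun s r => s + PySem.Int.floordiv r k) acc

lemma pvSumDiv_cons (r : Int) (l : List Int) (k acc : Int) :
    pvSumDiv (r :: l) k acc = pvSumDiv l k (acc + PySem.Int.floordiv r k) := rfl

lemma pv_div_succ (k run : Int) (hk : 0 < k) (h : run % k + 1 = k) :
    (run + 1) / k = run / k + 1 ∧ (run + 1) % k = 0 := by
  have hq : run + 1 = k * (run / k + 1) := by
    have h0 := Int.ediv_add_emod run k
    rw [mul_add, mul_one]; omega
  constructor
  · rw [hq, Int.mul_ediv_cancel_left _ (by omega : k ≠ 0)]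
  · rw [hq, Int.mul_emod_right]

lemma pv_div_succ' (k run : Int) (hk : 0 < k) (h : run % k + 1 ≠ k) :
    (run + 1) / k = run / k ∧ (run + 1) % k = run % k + 1 := by
  have hb : 0 ≤ run % k + 1 ∧ run % k + 1 < k := by
    have h1 := Int.emod_nonneg run (by omega : k ≠ 0)
    have h2 := Int.emod_lt_of_pos run hk
    omega
  have hq : run + 1 = (run % k + 1) + k * (run / k) := by
    have h0 := Int.ediv_add_emod run k; omega
  constructor
  · rw [hq, Int.add_mul_ediv_left _ _ (by omega : k ≠ 0),
        Int.ediv_eq_zero_of_lt hb.1 hb.2, zero_add]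
  · rw [hq, Int.add_mul_emod_self_left, Int.emod_eq_of_lt hb.1 hb.2]

-- Invariant: A's state after consuming a prefix whose current bloomed run has length
-- `run` is (num + run/k, run % k); the remaining fold then yields num + Σ r//k over
-- the runs of the rest (with `run` continuing the first run).
lemma pv_main (mid k : Int) (hk : 1 ≤ k) :
    ∀ (l : List Int) (run num : Int), 0 ≤ run →
      (l.foldl
        (fun (s : Int × Int) day =>
          let count := if day ≤ mid then s.2 + 1 else 0
          if count = k then (s.1 + 1, 0) else (s.1, count))
        (num + run / k, run % k)).1
      = pvSumDiv (pvRunsAux l mid run) k num := by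
  intro l
  induction l with
  | nil =>
    intro run num hrun
    simp only [List.foldl_nil, pvRunsAux]
    by_cases h : run = 0
    · simp [h, pvSumDiv]
    · rw [if_pos (h : run ≠ 0), pvSumDiv_cons]
      simp [pvSumDiv, PySem.Int.floordiv_eq_ediv_of_pos (by omega : (0:Int) < k)]
  | cons d rest ih =>
    intro run num hrun
    simp only [List.foldl_cons]
    by_cases hd : d ≤ mid
    · by_cases hc : run % k + 1 = k
      · obtain ⟨h1, h2⟩ := pv_div_succ k run (by omega) hc
        have := ih (run + 1) num (by omega)
        rw [h1, h2] at this
        simpa [pvRunsAux, hd, hc, add_assoc] using this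
      · obtain ⟨h1, h2⟩ := pv_div_succ' k run (by omega) hc
        have := ih (run + 1) num (by omega)
        rw [h1, h2] at this
        simpa [pvRunsAux, hd, hc] using this
    · have hne : ((0:Int) = k) = False := by
        simp only [eq_iff_iff, iff_false]; omega
      by_cases h : run = 0
      · have := ih 0 num (le_refl 0)
        simpa [pvRunsAux, hd, h, hne] using this
      · have := ih 0 (num + PySem.Int.floordiv run k) (le_refl 0)
        rw [PySem.Int.floordiv_eq_ediv_of_pos (by omega : (0:Int) < k)] at this
        simpa [pvRunsAux, hd, h, hne, pvSumDiv_cons,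
               PySem.Int.floordiv_eq_ediv_of_pos (by omega : (0:Int) < k)] using this

-- ===== VERDICT (by name: the statement is the Claim_ definition above) =====
theorem get_num_of_bouquets_spec : Claim_equal_get_num_of_bouquets := by
  intro bloomDay mid k _ hk
  unfold Spec_get_num_of_bouquets get_num_of_bouquets get_num_of_bouquets_alt
  have := pv_main mid k hk bloomDay 0 0 (le_refl 0)
  simpa [pvSumDiv] using this
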